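-- pv_equiv track=rewrite | github.com/Qualcomm-AI-research/ClevrSkills | clevr_skills/dataset_converters/action_trace_converter.py | expand_labels
-- ===== SOURCE A (Python) =====
-- from typing import List, Optional, Tuple
--
-- def expand_labels(
--     labels: List[List[Tuple[int, int, str]]], traj_length: int, no_action=""
-- ) -> List[List[Tuple[int, int, str]]]:
--     """
--     Utility function that expands the labels datastructure (as returned by extract_labels())
--     into a simple List of Lists of strs that can be indexed as labels[step_idx][depth_idx]
--     :param labels: List of List of [start_idx, end_idx, label].  Indexed as:
--     [depth_idx][action_idx][start, end, label]
--     :param traj_length: Length of trajectory. Required to pad the result to full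
--     length of the trajectory.
--     :param no_action:
--     :return:
--     """
--     expanded = []  # expand the labels into [depth_idx][step_idx]
--     for level in labels:
--         level_result = []
--         for start_idx, end_idx, label in level:
--             level_result += [no_action] * (start_idx - len(level_result))
--             level_result += [label] * (end_idx - start_idx)
--         level_result += [no_action] * (traj_length - len(level_result))
--         expanded.append(level_result)
--
--     # Return the transpose of expanded
--     return [
--         [expanded[depth][step_idx] for depth in range(len(expanded))]
--         for step_idx in range(traj_length)
--     ]
-- ===== SOURCE B (Python) =====
-- def expand_labels(labels, traj_length, no_action=""):
--     n = max(traj_length, 0)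
--     result = [[no_action] * len(labels) for _ in range(n)]
--     for depth, level in enumerate(labels):
--         cursor = 0
--         for start_idx, end_idx, label in level:
--             cursor = max(cursor, start_idx)
--             stop = cursor + max(end_idx - start_idx, 0)
--             for row in range(cursor, min(stop, n)):
--                 result[row][depth] = label
--             cursor = stop
--     return result
-- ===== Notes on version B (the rewrite author's own statement) =====
-- stated objective: alternative
-- what changed: B pre-allocates the transposed step-by-depth grid filled with no_action and writes each span's label through an explicit per-level cursor with clipped index writes, instead of concatenating replicate-blocks into per-level row lists and transposing them at the end.
import Mathlib
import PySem

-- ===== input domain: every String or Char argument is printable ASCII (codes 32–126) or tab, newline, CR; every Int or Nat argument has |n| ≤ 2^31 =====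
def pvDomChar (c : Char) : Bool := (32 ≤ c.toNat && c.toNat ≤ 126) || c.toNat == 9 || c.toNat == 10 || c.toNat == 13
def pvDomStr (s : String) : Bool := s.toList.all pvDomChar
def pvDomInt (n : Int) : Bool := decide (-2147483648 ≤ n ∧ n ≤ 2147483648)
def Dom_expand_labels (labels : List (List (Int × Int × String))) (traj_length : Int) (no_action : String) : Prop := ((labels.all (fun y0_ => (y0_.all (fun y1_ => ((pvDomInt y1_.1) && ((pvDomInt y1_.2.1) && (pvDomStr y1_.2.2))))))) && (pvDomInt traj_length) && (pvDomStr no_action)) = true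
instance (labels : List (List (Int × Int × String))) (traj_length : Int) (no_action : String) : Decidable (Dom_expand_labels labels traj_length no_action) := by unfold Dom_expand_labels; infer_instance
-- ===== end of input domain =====

-- B builds the transposed step×depth grid directly with a per-level cursor instead of
-- concatenating replicate-blocks into per-level rows and transposing (objective: alternative).

-- ===== PORT A =====
-- level_result += [no_action] * (start_idx - len(level_result)); level_result += [label] * (end_idx - start_idx)
-- ([x] * k with negative k is empty, which Int.toNat reproduces exactly)
def pvAStep (no_action : String) (acc : List String) (t : Int × Int × String) : List String :=
  acc ++ List.replicate (t.1 - (acc.length : Int)).toNat no_action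
      ++ List.replicate (t.2.1 - t.1).toNat t.2.2

def pvARow (level : List (Int × Int × String)) (traj_length : Int) (no_action : String) : List String :=
  let r := level.foldl (pvAStep no_action) []
  r ++ List.replicate (traj_length - (r.length : Int)).toNat no_action

-- the transpose comprehension; indices 'depth' (from range(len(expanded))) and 'step_idx'
-- (< traj_length ≤ length of each padded row) are always in range, so the total pyGetD is exact here
def expand_labels (labels : List (List (Int × Int × String))) (traj_length : Int) (no_action : String) : List (List String) :=
  let expanded := labels.map (fun level => pvARow level traj_length no_action)
  (PySem.List.pyRange 0 traj_length 1).map (fun step_idx =>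
    (PySem.List.pyRange 0 (expanded.length : Int) 1).map (fun depth =>
      (PySem.List.pyGetD (PySem.List.pyGetD expanded depth []) step_idx no_action)))

-- ===== PORT B =====
-- for row in range(cursor, min(stop, n)): result[row][depth] = label
def pvWrite (d : Int) (v : String) (a b : Int) (g : List (List String)) : List (List String) :=
  (PySem.List.pyRange a b 1).foldl (fun g row =>
    PySem.List.pySetD g row (PySem.List.pySetD (PySem.List.pyGetD g row []) d v)) g

-- cursor = max(cursor, start_idx); stop = cursor + max(end_idx - start_idx, 0); write; cursor = stop
def pvLevelStep (n : Int) (d : Int) (st : Int × List (List String)) (t : Int × Int × String) : Int × List (List String) :=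
  let cursor := max st.1 t.1
  let stop := cursor + max (t.2.1 - t.1) 0
  (stop, pvWrite d t.2.2 cursor (min stop n) st.2)

def expand_labels_alt (labels : List (List (Int × Int × String))) (traj_length : Int) (no_action : String) : List (List String) :=
  let n := max traj_length 0
  let init := List.replicate n.toNat (List.replicate labels.length no_action)
  (PySem.List.enumerate labels 0).foldl
    (fun result p => (p.2.foldl (pvLevelStep n p.1) (0, result)).2) init

-- ===== PRECONDITION & SPEC =====
def Spec_expand_labels (labels : List (List (Int × Int × String))) (traj_length : Int) (no_action : String) (out : List (List String)) : Prop := out = expand_labels_alt labels traj_length no_action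
instance (labels : List (List (Int × Int × String))) (traj_length : Int) (no_action : String) (out : List (List String)) : Decidable (Spec_expand_labels labels traj_length no_action out) := by unfold Spec_expand_labels; infer_instance

-- ===== CLAIM (what is proved, stated in full; the proofs are below) =====
def Claim_equal_expand_labels : Prop := ∀ (labels : List (List (Int × Int × String))) (traj_length : Int) (no_action : String), Dom_expand_labels labels traj_length no_action → Spec_expand_labels labels traj_length no_action (expand_labels labels traj_length no_action)

-- ===== LEMMAS AND PROOFS =====

-- the label (if any) covering step s, given the cursor is at c before the remaining spans
def pvFind (c : Int) (level : List (Int × Int × String)) (s : Int) : Option String :=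
  match level with
  | [] => none
  | t :: rest =>
      let lo := max c t.1
      let hi := lo + max (t.2.1 - t.1) 0
      if lo ≤ s ∧ s < hi then some t.2.2 else pvFind hi rest s

def pvEntry (g : List (List String)) (s d : Nat) (na : String) : String :=
  (g.getD s []).getD d na

lemma pvFind_none (level : List (Int × Int × String)) (c s : Int) (h : s < c) :
    pvFind c level s = none := by
  induction level generalizing c with
  | nil => rfl
  | cons t rest ih =>
      simp only [pvFind]
      rw [if_neg (by omega)]
      exact ih _ (by omega)

lemma pvAStep_getD (na : String) (acc : List String) (t : Int × Int × String) (s : Nat) :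
    (pvAStep na acc t).getD s na =
      if (s : Int) < max (acc.length : Int) t.1 then acc.getD s na
      else if (s : Int) < max (acc.length : Int) t.1 + max (t.2.1 - t.1) 0 then t.2.2
      else na := by
  simp only [pvAStep, List.append_assoc, List.getD_eq_getElem?_getD]
  rcases lt_or_ge s acc.length with h | h
  · rw [List.getElem?_append_left h, if_pos (by push_cast; omega)]
  · rw [List.getElem?_append_right h, List.getElem?_eq_none h]
    rcases lt_or_ge (s - acc.length) (t.1 - (acc.length : Int)).toNat with h2 | h2
    · rw [List.getElem?_append_left (by simpa using h2)]
      rw [if_pos (by omega)]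
      simp only [List.getElem?_replicate]
      split <;> rfl
    · rw [List.getElem?_append_right (by simpa using h2)]
      simp only [List.length_replicate]
      rcases lt_or_ge (s - acc.length - (t.1 - (acc.length : Int)).toNat) (t.2.1 - t.1).toNat
        with h3 | h3
      · rw [if_neg (by omega), if_pos (by omega)]
        simp only [List.getElem?_replicate]
        rw [if_pos (by omega)]
        rfl
      · rw [if_neg (by omega), if_neg (by omega)]
        rw [List.getElem?_eq_none (by simpa using h3)]
        rfl

lemma pvAStep_length (na : String) (acc : List String) (t : Int × Int × String) :
    ((pvAStep na acc t).length : Int) = max (acc.length : Int) t.1 + max (t.2.1 - t.1) 0 := by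
  simp only [pvAStep, List.length_append, List.length_replicate]
  push_cast
  omega

lemma pvAFold_getD (na : String) (level : List (Int × Int × String)) (acc : List String) (s : Nat) :
    (level.foldl (pvAStep na) acc).getD s na =
      (pvFind (acc.length : Int) level s).getD (acc.getD s na) := by
  induction level generalizing acc with
  | nil => simp [pvFind]
  | cons t rest ih =>
      simp only [List.foldl_cons, pvFind]
      rw [ih]
      rw [show ((pvAStep na acc t).length : Int) = max (acc.length : Int) t.1 + max (t.2.1 - t.1) 0
        from pvAStep_length na acc t]
      by_cases h1 : max (acc.length : Int) t.1 ≤ (s : Int) ∧ (s : Int) < max (acc.length : Int) t.1 + max (t.2.1 - t.1) 0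
      · rw [if_pos h1, pvFind_none _ _ _ (by omega), Option.getD_none, pvAStep_getD,
          if_neg (by omega : ¬ ((s:Int) < max (acc.length : Int) t.1)), if_pos h1.2]
        rfl
      · rw [if_neg h1]
        congr 1
        rw [pvAStep_getD]
        by_cases h2 : (s : Int) < max (acc.length : Int) t.1
        · rw [if_pos h2]
        · rw [if_neg h2, if_neg (by omega)]
          simp [List.getD_eq_getElem?_getD, List.getElem?_eq_none (by omega : acc.length ≤ s)]

lemma pvPad_getD (r : List String) (k : Nat) (na : String) (s : Nat) :
    (r ++ List.replicate k na).getD s na = r.getD s na := by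
  simp only [List.getD_eq_getElem?_getD]
  rcases lt_or_ge s r.length with h | h
  · rw [List.getElem?_append_left h]
  · rw [List.getElem?_append_right h, List.getElem?_eq_none h]
    rcases lt_or_ge (s - r.length) k with h2 | h2
    · simp [List.getElem?_replicate, h2]
    · rw [List.getElem?_eq_none (by simpa using h2)]

lemma pvARow_getD (level : List (Int × Int × String)) (tl : Int) (na : String) (s : Nat) :
    (pvARow level tl na).getD s na = (pvFind 0 level s).getD na := by
  simp only [pvARow, pvPad_getD]
  simpa using pvAFold_getD na level [] s

lemma pvEntry_set (g : List (List String)) (r : Nat) (d : Nat) (v na : String)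
    (hr : r < g.length) (hd : d < (g.getD r []).length) (s d' : Nat) :
    pvEntry (g.set r ((g.getD r []).set d v)) s d' na =
      if s = r ∧ d' = d then v else pvEntry g s d' na := by
  have hd2 : d < (g[r]?.getD []).length := by
    simpa [List.getD_eq_getElem?_getD] using hd
  simp only [pvEntry, List.getD_eq_getElem?_getD]
  split_ifs with h
  · obtain ⟨rfl, rfl⟩ := h
    rw [List.getElem?_set_self hr]
    simp only [Option.getD_some]
    rw [List.getElem?_set_self hd2]
    rfl
  · rcases eq_or_ne s r with rfl | hsr
    · have hdd : d' ≠ d := fun hc => h ⟨rfl, hc⟩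
      rw [List.getElem?_set_self hr]
      simp only [Option.getD_some]
      rw [List.getElem?_set_ne (by omega)]
    · rw [List.getElem?_set_ne (by omega)]

lemma pvWrite_all (L : Nat) (d : Nat) (v na : String) :
    ∀ (k : Nat) (a b : Int) (g : List (List String)), (b - a).toNat = k → 0 ≤ a →
      b ≤ (g.length : Int) → (∀ r ∈ g, r.length = L) → d < L →
      (pvWrite (d : Int) v a b g).length = g.length ∧
      (∀ r ∈ pvWrite (d : Int) v a b g, r.length = L) ∧
      (∀ s d' : Nat, s < g.length →
        pvEntry (pvWrite (d : Int) v a b g) s d' na =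
          if d' = d ∧ a ≤ (s : Int) ∧ (s : Int) < b then v else pvEntry g s d' na) := by
  intro k
  induction k with
  | zero =>
      intro a b g hk ha hb hrows hd
      have hba : b ≤ a := by omega
      simp only [pvWrite, PySem.List.pyRange_one_eq_nil hba, List.foldl_nil]
      refine ⟨by simp, hrows, ?_⟩
      intro s d' _
      rw [if_neg (by omega)]
  | succ k ih =>
      intro a b g hk ha hb hrows hd
      have hab : a < b := by omega
      have haN : a.toNat < g.length := by omega
      have hga : g.getD a.toNat [] = g[a.toNat] := by
        simp [List.getD_eq_getElem?_getD, List.getElem?_eq_getElem haN]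
      have hgaL : (g.getD a.toNat []).length = L := hga ▸ hrows _ (List.getElem_mem haN)
      have hstep : pvWrite (d : Int) v a b g =
          pvWrite (d : Int) v (a + 1) b (g.set a.toNat ((g.getD a.toNat []).set d v)) := by
        rw [show a = ((a.toNat : Nat) : Int) from by omega]
        simp only [pvWrite, PySem.List.pyRange_one_cons (by omega : ((a.toNat : Nat) : Int) < b),
          List.foldl_cons, PySem.List.pyGetD_natCast, PySem.List.pySetD_natCast,
          List.getD_eq_getElem?_getD, Int.toNat_natCast]
      set g1 := g.set a.toNat ((g.getD a.toNat []).set d v) with hg1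
      have hg1len : g1.length = g.length := by simp [hg1]
      have hg1rows : ∀ r ∈ g1, r.length = L := by
        intro r hr
        rcases List.mem_or_eq_of_mem_set hr with h | rfl
        · exact hrows r h
        · simpa using hgaL
      obtain ⟨ihlen, ihrows, ihent⟩ :=
        ih (a + 1) b g1 (by omega) (by omega) (by rw [hg1len]; exact hb) hg1rows hd
      rw [hstep]
      refine ⟨by rw [ihlen, hg1len], ihrows, ?_⟩
      intro s d' hs
      rw [ihent s d' (by omega), hg1, pvEntry_set g a.toNat d v na haN (by omega) s d']
      split_ifs <;> first | rfl | (exfalso; omega)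

lemma pvLevel_entry (L : Nat) (d : Nat) (na : String) (hd : d < L) :
    ∀ (level : List (Int × Int × String)) (c : Int) (n : Int) (g : List (List String)),
      0 ≤ c → (g.length : Int) = n → (∀ r ∈ g, r.length = L) →
      (level.foldl (pvLevelStep n (d : Int)) (c, g)).2.length = g.length ∧
      (∀ r ∈ (level.foldl (pvLevelStep n (d : Int)) (c, g)).2, r.length = L) ∧
      (∀ s d' : Nat, s < g.length →
        pvEntry (level.foldl (pvLevelStep n (d : Int)) (c, g)).2 s d' na =
          if d' = d then (pvFind c level (s : Int)).getD (pvEntry g s d' na)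
          else pvEntry g s d' na) := by
  intro level
  induction level with
  | nil =>
      intro c n g hc hn hrows
      refine ⟨by simp, hrows, ?_⟩
      intro s d' _
      simp [pvFind]
  | cons t rest ih =>
      intro c n g hc hn hrows
      simp only [List.foldl_cons, pvLevelStep]
      obtain ⟨wlen, wrows, went⟩ :=
        pvWrite_all L d t.2.2 na
          (min (max c t.1 + max (t.2.1 - t.1) 0) n - max c t.1).toNat
          (max c t.1) (min (max c t.1 + max (t.2.1 - t.1) 0) n) g rfl (by omega) (by omega)
          hrows hd
      obtain ⟨ihlen, ihrows, ihent⟩ :=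
        ih (max c t.1 + max (t.2.1 - t.1) 0) n
          (pvWrite (d : Int) t.2.2 (max c t.1) (min (max c t.1 + max (t.2.1 - t.1) 0) n) g)
          (by omega) (by rw [wlen]; exact hn) wrows
      refine ⟨by rw [ihlen, wlen], ihrows, ?_⟩
      intro s d' hs
      rw [ihent s d' (by omega), went s d' (by omega)]
      simp only [pvFind]
      split_ifs <;>
        first
          | rfl
          | (exfalso; omega)
          | (rw [pvFind_none _ _ _ (by omega)]; rfl)

lemma pvOuter_entry (L : Nat) (n : Int) (na : String) :
    ∀ (tail : List (List (Int × Int × String))) (k : Int) (g : List (List String)),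
      0 ≤ k → k + (tail.length : Int) ≤ (L : Int) → (g.length : Int) = n →
      (∀ r ∈ g, r.length = L) →
      ((PySem.List.enumerate tail k).foldl
          (fun result p => (p.2.foldl (pvLevelStep n p.1) (0, result)).2) g).length = g.length ∧
      (∀ r ∈ (PySem.List.enumerate tail k).foldl
          (fun result p => (p.2.foldl (pvLevelStep n p.1) (0, result)).2) g, r.length = L) ∧
      (∀ s d' : Nat, s < g.length → d' < L →
        pvEntry ((PySem.List.enumerate tail k).foldl
            (fun result p => (p.2.foldl (pvLevelStep n p.1) (0, result)).2) g) s d' na =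
          if k ≤ (d' : Int) ∧ (d' : Int) < k + tail.length
          then (pvFind 0 (tail.getD ((d' : Int) - k).toNat []) (s : Int)).getD (pvEntry g s d' na)
          else pvEntry g s d' na) := by
  intro tail
  induction tail with
  | nil =>
      intro k g hk hkL hn hrows
      simp only [PySem.List.enumerate_nil, List.foldl_nil]
      refine ⟨by simp, hrows, ?_⟩
      intro s d' _ _
      rw [if_neg (by push_cast [List.length_nil]; omega)]
  | cons x xs ih =>
      intro k g hk hkL hn hrows
      rw [PySem.List.enumerate_cons]
      simp only [List.foldl_cons]
      have hkL' : k.toNat < L := by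
        simp only [List.length_cons] at hkL
        push_cast at hkL
        omega
      obtain ⟨llen, lrows, lent⟩ :=
        pvLevel_entry L k.toNat na hkL' x 0 n g le_rfl hn hrows
      have hkcast : ((k.toNat : Nat) : Int) = k := by omega
      rw [hkcast] at llen lrows lent
      obtain ⟨ihlen, ihrows, ihent⟩ :=
        ih (k + 1) ((x.foldl (pvLevelStep n k) (0, g)).2)
          (by omega) (by simp only [List.length_cons] at hkL; push_cast at hkL ⊢; omega)
          (by rw [llen]; exact hn) lrows
      refine ⟨by rw [ihlen, llen], ihrows, ?_⟩
      intro s d' hs hd'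
      rw [ihent s d' (by omega) hd', lent s d' (by omega)]
      by_cases hdk : d' = k.toNat
      · subst hdk
        rw [if_neg (by push_cast [List.length_cons]; omega), if_pos rfl, if_pos (by push_cast [List.length_cons]; omega),
          show ((k.toNat : Int) - k).toNat = 0 from by omega]
        rfl
      · rw [if_neg hdk]
        by_cases h2 : k + 1 ≤ (d' : Int) ∧ (d' : Int) < k + 1 + (xs.length : Int)
        · rw [if_pos (by push_cast [List.length_cons]; omega), if_pos (by push_cast [List.length_cons]; omega),
            show ((d' : Int) - k).toNat = ((d' : Int) - (k + 1)).toNat + 1 from by omega,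
            List.getD_cons_succ]
        · rw [if_neg (by push_cast at h2 ⊢; omega), if_neg (by push_cast [List.length_cons] at h2 ⊢; omega)]

lemma pvEntry_eq_getElem (g : List (List String)) (s d : Nat) (na : String)
    (hs : s < g.length) (hd : d < g[s].length) : pvEntry g s d na = g[s][d] := by
  simp [pvEntry, List.getD_eq_getElem?_getD, List.getElem?_eq_getElem hs,
    List.getElem?_eq_getElem hd]

def pvSpec (labels : List (List (Int × Int × String))) (t : Int) (na : String) :
    List (List String) :=
  (List.range t.toNat).map (fun s => (List.range labels.length).map (fun d =>
    (pvFind 0 (labels.getD d []) ((s : Nat) : Int)).getD na))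

-- ===== VERDICT (by name: the statement is the Claim_ definition above) =====
theorem expand_labels_spec : Claim_equal_expand_labels := by
  intro labels t na _
  unfold Spec_expand_labels
  have hA : expand_labels labels t na = pvSpec labels t na := by
    simp only [expand_labels, pvSpec, PySem.List.pyRange_one, List.map_map, List.length_map,
      Int.sub_zero, Int.toNat_natCast]
    refine List.map_congr_left ?_
    intro s hs
    refine List.map_congr_left ?_
    intro d hd
    have hd' : d < labels.length := List.mem_range.mp hd
    simp only [Function.comp_apply, zero_add, PySem.List.pyGetD_natCast]
    rw [show (labels.map fun level => pvARow level t na).getD d [] =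
        pvARow (labels.getD d []) t na from by
      simp [List.getD_eq_getElem?_getD, List.getElem?_eq_getElem hd']]
    exact pvARow_getD _ _ _ _
  rw [hA]
  obtain ⟨blen, brows, bent⟩ :=
    pvOuter_entry labels.length (max t 0) na labels 0
      (List.replicate (max t 0).toNat (List.replicate labels.length na)) le_rfl
      (by omega) (by simp)
      (fun r hr => by rw [List.eq_of_mem_replicate hr, List.length_replicate])
  show pvSpec labels t na =
    (PySem.List.enumerate labels 0).foldl
      (fun result p => (p.2.foldl (pvLevelStep (max t 0) p.1) (0, result)).2)
      (List.replicate (max t 0).toNat (List.replicate labels.length na))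
  apply List.ext_getElem
  · rw [blen]
    simp [pvSpec]
    omega
  intro s h1 h2
  have hs0 : s < t.toNat := by simpa [pvSpec] using h1
  have hsN : s < (max t 0).toNat := by omega
  have hd2 := h2
  apply List.ext_getElem
  · rw [brows _ (List.getElem_mem h2)]
    simp [pvSpec]
  intro d hd1' hd2'
  have hd' : d < labels.length := by
    have := brows _ (List.getElem_mem h2)
    omega
  have e2 : pvEntry ((PySem.List.enumerate labels 0).foldl
      (fun result p => (p.2.foldl (pvLevelStep (max t 0) p.1) (0, result)).2)
      (List.replicate (max t 0).toNat (List.replicate labels.length na))) s d na =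
      (pvFind 0 (labels.getD d []) ((s : Nat) : Int)).getD na := by
    rw [bent s d (by simpa using hsN) hd', if_pos (by push_cast; omega),
      show (((d : Int) - 0).toNat) = d from by omega]
    congr 1 <;> simp [pvEntry, List.getD_eq_getElem?_getD, List.getElem?_replicate, hsN, hd']
  have e3 := (pvEntry_eq_getElem _ s d na h2 hd2').symm.trans e2
  rw [e3]
  simp [pvSpec]
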